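-- pv_equiv track=rewrite | github.com/zDudaHang/Linguagens_Formais | Aplicacao/structures/ExpressaoRegular.py | pegar_ramos
-- ===== SOURCE A (Python) =====
-- def pegar_ramos(expressao):
--     # Checa se tem parêntesis
--     if expressao[-1] == ')':
--         # Se tem, pega tudo q tem dentro do parêntesis como
--         # o ramo da direita, o restando como esquerda e pega
--         # o símbolo que relaciona os dois
--         stack = ['(']
--         i = -1
--         while len(stack) > 0:
--             i -= 1
--             if expressao[i] == stack[-1]:
--                 stack.pop()
--
--             elif expressao[i] == ')':
--                 stack.append('(')
--
--         if len(expressao) is - i: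
--             return None, None, expressao[1:-1]
--
--         else:
--             return expressao[:i-1], expressao[i-1], expressao[i+1: -1]
--
--
--     else:
--         # Caso contrário, só pega o símbolo e retorna como
--         # o ramo da direita
--         return expressao[:-2], expressao[-2], expressao[-1]
-- ===== SOURCE B (Python) =====
-- def pegar_ramos(expressao):
--     # Branch with no trailing ')': unchanged split on the last symbol.
--     if expressao[-1] != ')':
--         return expressao[:-2], expressao[-2], expressao[-1]
--     # Forward scan keeping a stack of '(' positions; the pop performed while
--     # consuming the final ')' is the position m of its matching '('.
--     stack = []
--     m = None
--     for idx, ch in enumerate(expressao):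
--         if ch == '(':
--             stack.append(idx)
--         elif ch == ')' and stack:
--             m = stack.pop()
--     if m == 0:
--         return None, None, expressao[1:-1]
--     return expressao[:m - 1], expressao[m - 1], expressao[m + 1:-1]
-- ===== Notes on version B (the rewrite author's own statement) =====
-- stated objective: alternative
-- what changed: A scans the string backwards with a while-loop, negative indices and a depth stack of open-paren characters, then tests the match position with a CPython small-int identity comparison of the length against the negated index; B makes one forward pass keeping a stack of open-paren positions, so the pop at the final closing paren directly yields the matching open-paren index m, from which the three branches are sliced with non-negative indices.
import Mathlib
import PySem

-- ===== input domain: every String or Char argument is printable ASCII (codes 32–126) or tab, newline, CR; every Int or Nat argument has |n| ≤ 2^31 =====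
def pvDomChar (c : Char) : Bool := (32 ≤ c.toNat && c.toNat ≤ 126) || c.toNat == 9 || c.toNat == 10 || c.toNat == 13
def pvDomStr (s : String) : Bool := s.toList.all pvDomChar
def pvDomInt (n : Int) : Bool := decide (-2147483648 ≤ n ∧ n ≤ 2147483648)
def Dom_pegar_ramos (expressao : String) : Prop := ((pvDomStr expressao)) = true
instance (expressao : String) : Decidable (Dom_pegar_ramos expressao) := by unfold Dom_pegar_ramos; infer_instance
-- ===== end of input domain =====

-- B replaces A's backward depth-counting scan by a single forward pass keeping a stack of
-- open-paren positions (alternative decomposition, same cost); return values agree on all of Pre_.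


-- ===== PORT A =====
-- A's backward while-loop: stack of open-paren chars (kept top-at-head; Python's stack[-1]
-- is the head here), index i counts down from -1; fuel bounds the recursion, one unit per
-- iteration (l.length + 2 is more than the loop can ever use before the stack empties or
-- the negative index leaves the range, where pyGet? returns none = IndexError).
def pegarLoopA (l : List Char) : Nat → List Char → Int → Option Int
  | 0, _, _ => none
  | fuel + 1, stack, i =>
    if stack.isEmpty then some i
    else
      match PySem.List.pyGet? l (i - 1) with
      | none => none                                   -- IndexError: outside Pre_
      | some c =>
        if some c = stack.head? then pegarLoopA l fuel stack.tail (i - 1)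
        else if c = ')' then pegarLoopA l fuel ('(' :: stack) (i - 1)
        else pegarLoopA l fuel stack (i - 1)

def pegar_ramos (expressao : String) : Option String × Option String × Option String :=
  match PySem.List.pyGet? expressao.toList (-1) with
  | none => (none, none, none)                         -- IndexError on '': outside Pre_
  | some last =>
    if last = ')' then
      match pegarLoopA expressao.toList (expressao.toList.length + 2) ['('] (-1) with
      | none => (none, none, none)                     -- IndexError in the loop: outside Pre_
      | some i =>
        -- CPython small-int identity test of len(expressao) against -i: equal AND cached (≤ 256)
        if (expressao.toList.length : Int) = -i ∧ expressao.toList.length ≤ 256 then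
          (none, none, some (PySem.Str.slice expressao (some 1) (some (-1))))
        else
          match PySem.List.pyGet? expressao.toList (i - 1) with
          | none => (none, none, none)                 -- IndexError: outside Pre_
          | some c =>
            (some (PySem.Str.slice expressao none (some (i - 1))), some (String.ofList [c]),
             some (PySem.Str.slice expressao (some (i + 1)) (some (-1))))
    else
      match PySem.List.pyGet? expressao.toList (-2) with
      | none => (none, none, none)                     -- IndexError: outside Pre_
      | some c =>
        (some (PySem.Str.slice expressao none (some (-2))), some (String.ofList [c]),
         some (String.ofList [last]))

-- ===== PORT B =====
-- one step of B's forward for-loop: state = (stack of open-paren positions, last popped position m)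
def bStep (st : List Int × Option Int) (p : Int × Char) : List Int × Option Int :=
  if p.2 = '(' then (p.1 :: st.1, st.2)
  else if p.2 = ')' ∧ st.1 ≠ [] then (st.1.tail, st.1.head?)
  else st

def pegar_ramos_alt (expressao : String) : Option String × Option String × Option String :=
  match PySem.List.pyGet? expressao.toList (-1) with
  | none => (none, none, none)                         -- IndexError on '': outside Pre_
  | some last =>
    if last ≠ ')' then
      match PySem.List.pyGet? expressao.toList (-2) with
      | none => (none, none, none)                     -- IndexError: outside Pre_
      | some c =>
        (some (PySem.Str.slice expressao none (some (-2))), some (String.ofList [c]),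
         some (String.ofList [last]))
    else
      match ((PySem.List.enumerate expressao.toList).foldl bStep ([], none)).2 with
      | none => (none, none, none)                     -- m is still None (TypeError): outside Pre_
      | some m =>
        if m = 0 then
          (none, none, some (PySem.Str.slice expressao (some 1) (some (-1))))
        else
          match PySem.List.pyGet? expressao.toList (m - 1) with
          | none => (none, none, none)                 -- unreachable under Pre_
          | some c =>
            (some (PySem.Str.slice expressao none (some (m - 1))), some (String.ofList [c]),
             some (PySem.Str.slice expressao (some (m + 1)) (some (-1))))

-- ===== PRECONDITION & SPEC =====
-- Pre_ excludes exactly the inputs where Python A raises: the empty string (IndexError on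
-- expressao[-1]); a length-1 string not ending in a closing paren (IndexError on
-- expressao[-2]); a string whose final closing paren has no matching open paren (the
-- backward scan runs off the front, IndexError); and a fully parenthesised string of
-- length ≥ 257 (the CPython small-int identity test of len(expressao) against -i is
-- false there, so A evaluates expressao[i-1] with i-1 = -len-1, IndexError).
def Pre_pegar_ramos (expressao : String) : Prop :=
  expressao.toList ≠ [] ∧
  (expressao.toList.getLast? = some ')' →
     (∃ j < expressao.toList.length - 1,
        (expressao.toList.dropLast.drop j).count '(' =
          (expressao.toList.dropLast.drop j).count ')' + 1) ∧
     (257 ≤ expressao.toList.length → ∃ j < expressao.toList.length - 1, 1 ≤ j ∧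
        (expressao.toList.dropLast.drop j).count '(' =
          (expressao.toList.dropLast.drop j).count ')' + 1)) ∧
  (expressao.toList.getLast? ≠ some ')' → 2 ≤ expressao.toList.length)
instance (expressao : String) : Decidable (Pre_pegar_ramos expressao) := by
  unfold Pre_pegar_ramos; infer_instance

def pvWitness_pegar_ramos : String := "a(b)"

def Spec_pegar_ramos (expressao : String) (out : Option String × Option String × Option String) : Prop := out = pegar_ramos_alt expressao
instance (expressao : String) (out : Option String × Option String × Option String) : Decidable (Spec_pegar_ramos expressao out) := by unfold Spec_pegar_ramos; infer_instance

-- ===== CLAIM (what is proved, stated in full; the proofs are below) =====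
def Claim_equal_pegar_ramos : Prop := ∀ (expressao : String), Dom_pegar_ramos expressao → Pre_pegar_ramos expressao → Spec_pegar_ramos expressao (pegar_ramos expressao)

-- ===== LEMMAS AND PROOFS =====

-- the stack of positions of currently-unmatched open parens after B's loop has read t (top first)
def stackOf (t : List Char) : List Int :=
  ((PySem.List.enumerate t).foldl bStep ([], none)).1

-- largest j < n with p j
def findMax (p : Nat → Bool) : Nat → Option Nat
  | 0 => none
  | n + 1 => if p n then some n else findMax p n

-- depth condition of A's scan: the suffix of t from j closes d more parens than it opens
def balP (t : List Char) (d : Nat) (j : Nat) : Bool :=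
  decide ((t.drop j).count '(' = (t.drop j).count ')' + d)

lemma findMax_congr {p q : Nat → Bool} : ∀ n, (∀ j, j < n → p j = q j) → findMax p n = findMax q n := by
  intro n
  induction n with
  | zero => intro _; rfl
  | succ n ih =>
    intro h
    simp only [findMax, h n (by omega)]
    rw [ih (fun j hj => h j (by omega))]

lemma findMax_eq_some {p : Nat → Bool} : ∀ {n j}, findMax p n = some j →
    j < n ∧ p j = true ∧ ∀ k, j < k → k < n → p k = false := by
  intro n
  induction n with
  | zero => intro j h; simp [findMax] at h
  | succ n ih =>
    intro j h
    by_cases hp : p n = true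
    · simp [findMax, hp] at h
      subst h
      exact ⟨by omega, hp, fun k hk hk' => by omega⟩
    · simp [findMax, hp] at h
      obtain ⟨h1, h2, h3⟩ := ih h
      refine ⟨by omega, h2, fun k hk hk' => ?_⟩
      by_cases hkn : k = n
      · subst hkn; simpa using hp
      · exact h3 k hk (by omega)

lemma findMax_isSome {p : Nat → Bool} {j : Nat} : ∀ {n}, j < n → p j = true → (findMax p n).isSome = true := by
  intro n
  induction n with
  | zero => omega
  | succ n ih =>
    intro hj hp
    by_cases hpn : p n = true
    · simp [findMax, hpn]
    · have hj' : j < n := by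
        rcases Nat.lt_succ_iff_lt_or_eq.mp hj with h | h
        · exact h
        · subst h; simp [hp] at hpn
      simp [findMax, hpn]
      exact ih hj' hp

-- one forward step of the position stack
lemma stackOf_append (t : List Char) (c : Char) :
    stackOf (t ++ [c]) =
      if c = '(' then (t.length : Int) :: stackOf t
      else if c = ')' then (stackOf t).tail
      else stackOf t := by
  unfold stackOf
  rw [PySem.List.enumerate_append, List.foldl_append]
  simp only [PySem.List.enumerate_cons, PySem.List.enumerate_nil, List.foldl_cons, List.foldl_nil]
  set r := (PySem.List.enumerate t).foldl bStep ([], none) with hr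
  by_cases h1 : c = '('
  · simp [bStep, h1]
  · by_cases h2 : c = ')'
    · by_cases h3 : r.1 = []
      · simp [bStep, h2, h3]
      · simp [bStep, h2, h3]
    · simp [bStep, h1, h2]

-- the m-component after the final closing paren is the top of the stack built from the rest
lemma mOf_append (t : List Char) {x : Int} {st : List Int} (h : stackOf t = x :: st) :
    ((PySem.List.enumerate (t ++ [')'])).foldl bStep ([], none)).2 = some x := by
  rw [PySem.List.enumerate_append, List.foldl_append]
  simp only [PySem.List.enumerate_cons, PySem.List.enumerate_nil, List.foldl_cons, List.foldl_nil]
  have h1 : ((PySem.List.enumerate t).foldl bStep ([], none)).1 = x :: st := h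
  simp [bStep, h1]

-- the i-th unmatched open paren (from the top) is the largest j whose suffix closes i+1 parens
lemma stackOf_eq_findMax (t : List Char) : ∀ i : Nat,
    (stackOf t)[i]? = (findMax (balP t (i + 1)) t.length).map (fun j => (j : Int)) := by
  induction t using List.reverseRecOn with
  | nil => intro i; simp [stackOf, PySem.List.enumerate_nil, findMax]
  | append_singleton t c ih =>
    intro i
    have hlen : (t ++ [c]).length = t.length + 1 := by simp
    have hdrop : ∀ j, j ≤ t.length → (t ++ [c]).drop j = t.drop j ++ [c] := by
      intro j hj; rw [List.drop_append_of_le_length hj]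
    have hdropn : (t ++ [c]).drop t.length = [c] := by
      rw [hdrop t.length le_rfl]; simp
    rw [hlen]
    simp only [findMax]
    by_cases h1 : c = '('
    · subst h1
      have hso : stackOf (t ++ ['(']) = (t.length : Int) :: stackOf t := by
        rw [stackOf_append]; simp
      have hbn : balP (t ++ ['(']) (i + 1) t.length = decide (i = 0) := by
        unfold balP
        rw [hdropn, decide_eq_decide]
        have c1 : (['('] : List Char).count '(' = 1 := rfl
        have c2 : (['('] : List Char).count ')' = 0 := rfl
        rw [c1, c2]; omega
      rw [hso, hbn]
      by_cases hi : i = 0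
      · subst hi; simp
      · have hcong : findMax (balP (t ++ ['(']) (i + 1)) t.length = findMax (balP t i) t.length := by
          apply findMax_congr
          intro j hj
          unfold balP
          rw [hdrop j (by omega), decide_eq_decide]
          have c1 : (['('] : List Char).count '(' = 1 := rfl
          have c2 : (['('] : List Char).count ')' = 0 := rfl
          rw [List.count_append, List.count_append, c1, c2]; omega
        simp only [decide_eq_true_eq, hi, if_false]
        rw [hcong]
        obtain ⟨i', rfl⟩ : ∃ i', i = i' + 1 := ⟨i - 1, by omega⟩
        rw [List.getElem?_cons_succ]
        exact ih i'
    · by_cases h2 : c = ')'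
      · subst h2
        have hso : stackOf (t ++ [')']) = (stackOf t).tail := by
          rw [stackOf_append]; simp
        have hbn : balP (t ++ [')']) (i + 1) t.length = false := by
          unfold balP
          rw [hdropn, decide_eq_false_iff_not]
          have c1 : ([')'] : List Char).count '(' = 0 := rfl
          have c2 : ([')'] : List Char).count ')' = 1 := rfl
          rw [c1, c2]; omega
        have hcong : findMax (balP (t ++ [')']) (i + 1)) t.length = findMax (balP t (i + 2)) t.length := by
          apply findMax_congr
          intro j hj
          unfold balP
          rw [hdrop j (by omega), decide_eq_decide]
          have c1 : ([')'] : List Char).count '(' = 0 := rfl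
          have c2 : ([')'] : List Char).count ')' = 1 := rfl
          rw [List.count_append, List.count_append, c1, c2]; omega
        rw [hso, hbn]
        simp only [Bool.false_eq_true, if_false]
        rw [hcong, List.getElem?_tail]
        exact ih (i + 1)
      · have hso : stackOf (t ++ [c]) = stackOf t := by
          rw [stackOf_append]; simp [h1, h2]
        have c1 : ([c] : List Char).count '(' = 0 := by simp [h1]
        have c2 : ([c] : List Char).count ')' = 0 := by simp [h2]
        have hbn : balP (t ++ [c]) (i + 1) t.length = false := by
          unfold balP
          rw [hdropn, decide_eq_false_iff_not, c1, c2]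
          omega
        have hcong : findMax (balP (t ++ [c]) (i + 1)) t.length = findMax (balP t (i + 1)) t.length := by
          apply findMax_congr
          intro j hj
          unfold balP
          rw [hdrop j (by omega), decide_eq_decide]
          rw [List.count_append, List.count_append, c1, c2]
          omega
        rw [hso, hbn]
        simp only [Bool.false_eq_true, if_false]
        rw [hcong]
        exact ih i

lemma pegarLoopA_nil (l : List Char) (i : Int) (fuel : Nat) (h : 1 ≤ fuel) :
    pegarLoopA l fuel [] i = some i := by
  obtain ⟨f, rfl⟩ : ∃ f, fuel = f + 1 := ⟨fuel - 1, by omega⟩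
  simp [pegarLoopA]

lemma pegarLoopA_step (l : List Char) (f : Nat) (stack : List Char) (i : Int) (c : Char)
    (hs : stack.isEmpty = false) (hc : PySem.List.pyGet? l (i - 1) = some c) :
    pegarLoopA l (f + 1) stack i =
      if some c = stack.head? then pegarLoopA l f stack.tail (i - 1)
      else if c = ')' then pegarLoopA l f ('(' :: stack) (i - 1)
      else pegarLoopA l f stack (i - 1) := by
  rw [pegarLoopA, hs]
  simp only [Bool.false_eq_true, if_false, hc]

-- A's backward scan started d deep just above position p returns (d-th stack entry) - len
lemma pegarLoopA_spec (l : List Char) : ∀ (p d fuel : Nat), p ≤ l.length → 1 ≤ d → p + 2 ≤ fuel →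
    pegarLoopA l fuel (List.replicate d '(') ((p : Int) - l.length) =
      ((stackOf (l.take p))[d - 1]?).map (fun j => j - (l.length : Int)) := by
  intro p
  induction p with
  | zero =>
    intro d fuel _ hd hfuel
    obtain ⟨f, rfl⟩ : ∃ f, fuel = f + 1 := ⟨fuel - 1, by omega⟩
    have hne : (List.replicate d '(').isEmpty = false := by
      simp; omega
    have hnone : PySem.List.pyGet? l (((0 : Nat) : Int) - l.length - 1) = none := by
      rw [PySem.List.pyGet?_eq_none_iff]
      simp [PySem.Raise.InRange]
    rw [pegarLoopA, hne]
    simp only [Bool.false_eq_true, if_false]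
    rw [hnone]
    simp [stackOf, PySem.List.enumerate_nil]
  | succ p ih =>
    intro d fuel hp hd hfuel
    obtain ⟨f, rfl⟩ : ∃ f, fuel = f + 1 := ⟨fuel - 1, by omega⟩
    obtain ⟨d', rfl⟩ : ∃ d', d = d' + 1 := ⟨d - 1, by omega⟩
    have hne : (List.replicate (d' + 1) '(').isEmpty = false := by simp
    have hplt : p < l.length := by omega
    have hget : PySem.List.pyGet? l (((p + 1 : Nat) : Int) - l.length - 1) = some l[p] := by
      rw [show ((p + 1 : Nat) : Int) - l.length - 1 = -(((l.length - p : Nat)) : Int) from by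
        push_cast [Nat.cast_sub (le_of_lt hplt)]; ring]
      rw [PySem.List.pyGet?_neg_natCast l (l.length - p) (by omega) (by omega)]
      rw [show l.length - (l.length - p) = p from by omega, List.getElem?_eq_getElem hplt]
    have htake : l.take (p + 1) = l.take p ++ [l[p]] := by
      rw [List.take_add_one, List.getElem?_eq_getElem hplt]; rfl
    have hlentake : (l.take p).length = p := List.length_take_of_le (by omega)
    have hstep : stackOf (l.take (p + 1)) =
        if l[p] = '(' then ((p : Nat) : Int) :: stackOf (l.take p)
        else if l[p] = ')' then (stackOf (l.take p)).tail
        else stackOf (l.take p) := by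
      rw [htake, stackOf_append, hlentake]
    have hhead : (List.replicate (d' + 1) '(').head? = some '(' := rfl
    have harith : ((p + 1 : Nat) : Int) - l.length - 1 = (p : Int) - l.length := by push_cast; ring
    rw [pegarLoopA_step l f _ _ _ hne hget, hhead, harith]
    by_cases h1 : l[p] = '('
    · rw [if_pos (by rw [h1])]
      have htail : (List.replicate (d' + 1) '(').tail = List.replicate d' '(' := by
        rw [List.replicate_succ]; rfl
      rw [htail, hstep, if_pos h1]
      by_cases hd' : d' = 0
      · subst hd'
        rw [show List.replicate 0 '(' = ([] : List Char) from rfl]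
        rw [pegarLoopA_nil l _ f (by omega)]
        simp
      · rw [ih d' f (by omega) (by omega) (by omega)]
        obtain ⟨d'', rfl⟩ : ∃ d'', d' = d'' + 1 := ⟨d' - 1, by omega⟩
        simp
    · rw [if_neg (by simp [h1])]
      by_cases h2 : l[p] = ')'
      · rw [if_pos h2]
        have hrep2 : '(' :: List.replicate (d' + 1) '(' = List.replicate (d' + 2) '(' := rfl
        rw [hrep2, ih (d' + 2) f (by omega) (by omega) (by omega)]
        rw [hstep, if_neg h1, if_pos h2]
        simp [List.getElem?_tail]
      · rw [if_neg h2]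
        rw [ih (d' + 1) f (by omega) (by omega) (by omega)]
        rw [hstep, if_neg h1, if_neg h2]

lemma clampIdx_sub_length (n : Nat) (i : Int) (h0 : 0 ≤ i) (h : i < n) :
    PySem.List.clampIdx n (i - n) = PySem.List.clampIdx n i := by
  simp only [PySem.List.clampIdx]
  split_ifs <;> omega

lemma slice_sub_to (s : String) (i : Int) (h0 : 0 ≤ i) (h : i < s.toList.length) :
    PySem.Str.slice s none (some (i - s.toList.length)) = PySem.Str.slice s none (some i) := by
  apply String.ext
  rw [PySem.Str.toList_slice, PySem.Str.toList_slice]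
  simp only [PySem.Chars.slice_eq_listSlice, PySem.List.slice]
  rw [clampIdx_sub_length _ _ h0 h]

lemma slice_sub_from (s : String) (i : Int) (h0 : 0 ≤ i) (h : i < s.toList.length) :
    PySem.Str.slice s (some (i - s.toList.length)) (some (-1)) = PySem.Str.slice s (some i) (some (-1)) := by
  apply String.ext
  rw [PySem.Str.toList_slice, PySem.Str.toList_slice]
  simp only [PySem.Chars.slice_eq_listSlice, PySem.List.slice]
  rw [clampIdx_sub_length _ _ h0 h]

-- the two Pythons agree: main assembly
lemma agree (s : String) (hpre : Pre_pegar_ramos s) : pegar_ramos s = pegar_ramos_alt s := by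
  obtain ⟨hne, hpar, hnopar⟩ := hpre
  obtain ⟨t, c, hlc0⟩ := (List.eq_nil_or_concat s.toList).resolve_left hne
  have hlc : s.toList = t ++ [c] := by rw [hlc0, List.concat_eq_append]
  have hgl : s.toList.getLast? = some c := by rw [hlc, List.getLast?_concat]
  have hdl : s.toList.dropLast = t := by rw [hlc, List.dropLast_concat]
  have hlen : s.toList.length = t.length + 1 := by rw [hlc]; simp
  unfold pegar_ramos pegar_ramos_alt
  have hget1 : PySem.List.pyGet? s.toList (-1) = some c := by
    rw [hlc]; exact PySem.List.pyGet?_neg_one_append_singleton t c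
  rw [hget1]
  simp only []
  by_cases hcp : c = ')'
  · subst hcp
    rw [if_pos rfl, if_neg (by simp)]
    -- the final closing paren has a match: largest j with balP t 1 j
    have hM : ∃ j < t.length, balP t 1 j = true := by
      obtain ⟨j, hj, hcnt⟩ := (hpar hgl).1
      rw [hdl] at hcnt
      rw [hlen] at hj
      exact ⟨j, by omega, by simp [balP, hcnt]⟩
    obtain ⟨j, hj, hbj⟩ := hM
    obtain ⟨j₀, hfm⟩ : ∃ j₀, findMax (balP t 1) t.length = some j₀ := by
      have := findMax_isSome hj hbj
      exact Option.isSome_iff_exists.mp this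
    obtain ⟨hj₀lt, hbj₀, hmax⟩ := findMax_eq_some hfm
    have st0 : (stackOf t)[0]? = some ((j₀ : Nat) : Int) := by
      rw [stackOf_eq_findMax t 0, hfm]; rfl
    obtain ⟨st', hst⟩ : ∃ st', stackOf t = ((j₀ : Nat) : Int) :: st' := by
      cases h : stackOf t with
      | nil => rw [h] at st0; simp at st0
      | cons x xs =>
        rw [h] at st0
        simp at st0
        exact ⟨xs, by rw [st0]⟩
    -- A's loop result
    have hloop : pegarLoopA s.toList (s.toList.length + 2) ['('] (-1) =
        some (((j₀ : Nat) : Int) - s.toList.length) := by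
      have h1 : (['('] : List Char) = List.replicate 1 '(' := rfl
      have h2 : (-1 : Int) = ((t.length : Nat) : Int) - (s.toList.length : Int) := by
        rw [hlen]; push_cast; ring
      rw [h1, h2, pegarLoopA_spec s.toList t.length 1 (s.toList.length + 2)
        (by omega) (by omega) (by omega)]
      have htk : s.toList.take t.length = t := by
        rw [hlc]; exact List.take_left
      rw [htk]
      simp only [Nat.sub_self, st0, Option.map_some]
    rw [hloop]
    simp only []
    -- B's m
    have hm : ((PySem.List.enumerate s.toList).foldl bStep ([], none)).2 =
        some ((j₀ : Nat) : Int) := by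
      rw [hlc]
      exact mOf_append t hst
    rw [hm]
    simp only []
    by_cases hz : j₀ = 0
    · subst hz
      have h256 : s.toList.length ≤ 256 := by
        by_contra hbig
        obtain ⟨j', hj'lt, hj'1, hj'cnt⟩ := (hpar hgl).2 (by omega)
        rw [hdl] at hj'cnt
        rw [hlen] at hj'lt
        have := hmax j' (by omega) (by omega)
        rw [balP] at this
        simp [hj'cnt] at this
      rw [if_pos (⟨by push_cast; ring, h256⟩ : _ ∧ _), if_pos (show ((0:Nat):Int) = 0 from by norm_num)]
    · have hcondA : ¬ ((s.toList.length : Int) = -(((j₀ : Nat) : Int) - s.toList.length) ∧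
          s.toList.length ≤ 256) := by
        rintro ⟨h, -⟩
        omega
      rw [if_neg hcondA, if_neg (by exact_mod_cast hz)]
      have hj₀1 : 1 ≤ j₀ := by omega
      have hj₀len : j₀ < s.toList.length := by omega
      -- the indexed character
      have hgetA : PySem.List.pyGet? s.toList (((j₀ : Nat) : Int) - s.toList.length - 1) =
          s.toList[j₀ - 1]? := by
        rw [show ((j₀ : Nat) : Int) - s.toList.length - 1 =
            -(((s.toList.length - (j₀ - 1) : Nat)) : Int) from by
          push_cast [Nat.cast_sub (by omega : j₀ - 1 ≤ s.toList.length)]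
          push_cast [Nat.cast_sub (by omega : 1 ≤ j₀)]
          ring]
        rw [PySem.List.pyGet?_neg_natCast s.toList (s.toList.length - (j₀ - 1))
          (by omega) (by omega)]
        congr 1
        omega
      have hgetB : PySem.List.pyGet? s.toList (((j₀ : Nat) : Int) - 1) = s.toList[j₀ - 1]? := by
        rw [show ((j₀ : Nat) : Int) - 1 = (((j₀ - 1 : Nat)) : Int) from by
          push_cast [Nat.cast_sub (by omega : 1 ≤ j₀)]; ring]
        exact PySem.List.pyGet?_natCast _ _
      rw [hgetA, hgetB]
      have hsome : s.toList[j₀ - 1]? = some (s.toList[j₀ - 1]'(by omega)) :=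
        List.getElem?_eq_getElem (by omega)
      rw [hsome]
      simp only []
      -- slices agree
      have hs1 : PySem.Str.slice s none (some (((j₀ : Nat) : Int) - ↑s.toList.length - 1)) =
          PySem.Str.slice s none (some (((j₀ : Nat) : Int) - 1)) := by
        rw [show ((j₀ : Nat) : Int) - ↑s.toList.length - 1 =
            (((j₀ : Nat) : Int) - 1) - ↑s.toList.length from by ring]
        exact slice_sub_to s _ (by omega) (by omega)
      have hs2 : PySem.Str.slice s (some (((j₀ : Nat) : Int) - ↑s.toList.length + 1)) (some (-1)) =
          PySem.Str.slice s (some (((j₀ : Nat) : Int) + 1)) (some (-1)) := by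
        rw [show ((j₀ : Nat) : Int) - ↑s.toList.length + 1 =
            (((j₀ : Nat) : Int) + 1) - ↑s.toList.length from by ring]
        exact slice_sub_from s _ (by omega) (by rw [hlen]; push_cast; omega)
      rw [hs1, hs2]
  · rw [if_neg hcp, if_pos hcp]

-- ===== VERDICT (by name: the statement is the Claim_ definition above) =====
theorem pegar_ramos_spec : Claim_equal_pegar_ramos := by
  intro s _ hpre
  unfold Spec_pegar_ramos
  exact agree s hpre
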